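-- pv_equiv track=rewrite | github.com/wyq220136/Research-on-Multi-robot-Scheduling-Based-on-Key-Task-Allocation | spatial_astar.py | matchcolor
-- ===== SOURCE A (Python) =====
-- def matchcolor(car_num):
--     color = [(0, 0, 0)]*car_num
--     spnum = car_num//3 + 1
--     pace = 240//spnum
--     init = [0, 0, 0]
--     for i in range(0, car_num):
--         if init[1] < init[0]:
--             init[1] += pace
--         elif init[2] < init[1]:
--             init[2] += pace
--         else:
--             init[0] += pace
--         t = tuple(init)
--         color[i] = t
--     return color
-- ===== SOURCE B (Python) =====
-- def matchcolor(car_num):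
--     spnum = car_num // 3 + 1
--     pace = 240 // spnum
--     return [tuple(pace * ((i - j) // 3 + 1) for j in range(3)) for i in range(car_num)]
-- ===== Notes on version B (the rewrite author's own statement) =====
-- stated objective: simpler
-- what changed: Replaces A's sequential mutable 3-component state machine (if/elif/else updating init each iteration) with a stateless closed-form per-index formula: element i is (pace*((i-j)//3+1) for j in 0,1,2).
import Mathlib
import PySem

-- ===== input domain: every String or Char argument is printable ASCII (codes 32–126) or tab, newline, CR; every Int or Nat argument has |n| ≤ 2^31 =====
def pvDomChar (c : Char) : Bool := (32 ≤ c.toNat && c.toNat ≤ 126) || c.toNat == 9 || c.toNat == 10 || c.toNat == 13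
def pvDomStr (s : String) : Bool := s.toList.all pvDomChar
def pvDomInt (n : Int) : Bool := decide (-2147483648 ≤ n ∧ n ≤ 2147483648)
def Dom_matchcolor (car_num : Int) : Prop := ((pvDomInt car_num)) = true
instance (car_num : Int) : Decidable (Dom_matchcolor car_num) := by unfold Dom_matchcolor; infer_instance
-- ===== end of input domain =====

-- B replaces A's sequential 3-state accumulator by a closed-form per-index formula (simpler, no running state).

-- ===== PORT A =====
-- loop body of A: the if/elif/else on the mutable list `init`, then color[i] = tuple(init)
-- (i comes from range(0, car_num), so 0 ≤ i and i < len(color); `.set i.toNat` is exact there)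
def pvStepA (pace : Int) (st : (Int × Int × Int) × List (Int × Int × Int)) (i : Int) :
    (Int × Int × Int) × List (Int × Int × Int) :=
  let init := st.1
  let init :=
    if init.2.1 < init.1 then (init.1, init.2.1 + pace, init.2.2)
    else if init.2.2 < init.2.1 then (init.1, init.2.1, init.2.2 + pace)
    else (init.1 + pace, init.2.1, init.2.2)
  (init, st.2.set i.toNat init)

def matchcolor (car_num : Int) : List (Int × Int × Int) :=
  let color := List.replicate car_num.toNat ((0 : Int), (0 : Int), (0 : Int))
  let spnum := PySem.Int.floordiv car_num 3 + 1
  let pace := PySem.Int.floordiv 240 spnum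
  let res := (PySem.List.pyRange 0 car_num 1).foldl (pvStepA pace) ((0, 0, 0), color)
  res.2

-- ===== PORT B =====
def matchcolor_alt (car_num : Int) : List (Int × Int × Int) :=
  let spnum := PySem.Int.floordiv car_num 3 + 1
  let pace := PySem.Int.floordiv 240 spnum
  (PySem.List.pyRange 0 car_num 1).map (fun i =>
    (pace * (PySem.Int.floordiv (i - 0) 3 + 1),
     pace * (PySem.Int.floordiv (i - 1) 3 + 1),
     pace * (PySem.Int.floordiv (i - 2) 3 + 1)))

-- ===== PRECONDITION & SPEC =====
-- Pre_ excludes exactly car_num ∈ {-3,-2,-1}, where A raises ZeroDivisionError (spnum = car_num//3+1 = 0).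
def Pre_matchcolor (car_num : Int) : Prop := car_num < -3 ∨ 0 ≤ car_num
instance (car_num : Int) : Decidable (Pre_matchcolor car_num) := by unfold Pre_matchcolor; infer_instance
def pvWitness_matchcolor : Int := 7

def Spec_matchcolor (car_num : Int) (out : List (Int × Int × Int)) : Prop := out = matchcolor_alt car_num
instance (car_num : Int) (out : List (Int × Int × Int)) : Decidable (Spec_matchcolor car_num out) := by unfold Spec_matchcolor; infer_instance

-- ===== CLAIM (what is proved, stated in full; the proofs are below) =====
def Claim_equal_matchcolor : Prop := ∀ (car_num : Int), Dom_matchcolor car_num → Pre_matchcolor car_num → Spec_matchcolor car_num (matchcolor car_num)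

-- ===== LEMMAS AND PROOFS =====

-- component value of A's state after k loop iterations (j = 0,1,2)
def pvC (pace k j : Int) : Int := pace * (PySem.Int.floordiv (k - 1 - j) 3 + 1)

theorem pv_mul_lt_iff (p a b : Int) (hp : 0 < p) : p * a < p * b ↔ a < b := by
  constructor
  · intro h; by_contra hle; push_neg at hle; nlinarith
  · intro h; nlinarith

theorem pv_mul_eq (p a b : Int) (h : a = b) : p * a = p * b := by rw [h]

theorem pv_mul_add (p a b : Int) (h : b = a + 1) : p * a + p = p * b := by subst h; ring

theorem pvStep_init (pace : Int) (hp : 0 ≤ pace) (k : Nat) :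
    (if pvC pace k 1 < pvC pace k 0 then (pvC pace k 0, pvC pace k 1 + pace, pvC pace k 2)
     else if pvC pace k 2 < pvC pace k 1 then (pvC pace k 0, pvC pace k 1, pvC pace k 2 + pace)
     else (pvC pace k 0 + pace, pvC pace k 1, pvC pace k 2))
    = (pvC pace (k + 1) 0, pvC pace (k + 1) 1, pvC pace (k + 1) 2) := by
  rcases hp.lt_or_eq with hpos | hzero
  · simp only [pvC, PySem.Int.floordiv_eq_ediv_of_pos (show (0:Int) < 3 by norm_num),
      pv_mul_lt_iff _ _ _ hpos]
    split_ifs with h1 h2 <;>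
      simp only [Prod.mk.injEq] <;>
      refine ⟨?_, ?_, ?_⟩ <;>
      first
        | (apply pv_mul_add; omega)
        | (apply pv_mul_eq; omega)
  · simp [pvC, ← hzero]

theorem pv_set_mid {α : Type} (l1 : List α) (m r : Nat) (x a : α) (h : l1.length = m)
    (hr : 0 < r) :
    (l1 ++ List.replicate r x).set m a = l1 ++ a :: List.replicate (r - 1) x := by
  subst h
  rw [List.set_append_right _ _ le_rfl, Nat.sub_self]
  cases r with
  | zero => omega
  | succ r => simp [List.replicate_succ]

theorem pv_loop_inv (pace : Int) (hp : 0 ≤ pace) (n : Nat) : ∀ k : Nat, k ≤ n →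
    (PySem.List.pyRange 0 (k : Int) 1).foldl (pvStepA pace)
        ((0, 0, 0), List.replicate n ((0 : Int), (0 : Int), (0 : Int)))
    = ((pvC pace k 0, pvC pace k 1, pvC pace k 2),
       ((PySem.List.pyRange 0 (k : Int) 1).map
          (fun i => (pvC pace (i + 1) 0, pvC pace (i + 1) 1, pvC pace (i + 1) 2)))
         ++ List.replicate (n - k) ((0 : Int), (0 : Int), (0 : Int))) := by
  intro k
  induction k with
  | zero =>
    intro _
    simp [PySem.List.pyRange_one_eq_nil, pvC, PySem.Int.floordiv]
  | succ k ih =>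
    intro hk
    have hk' : k ≤ n := Nat.le_of_succ_le hk
    have hsplit : PySem.List.pyRange 0 ((k : Int) + 1) 1
        = PySem.List.pyRange 0 (k : Int) 1 ++ [(k : Int)] :=
      PySem.List.pyRange_one_succ_right (by positivity)
    push_cast
    rw [hsplit, List.foldl_append, ih hk', List.foldl_cons, List.foldl_nil, List.map_append]
    have hlen : ((PySem.List.pyRange 0 (k : Int) 1).map
        (fun i => (pvC pace (i + 1) 0, pvC pace (i + 1) 1, pvC pace (i + 1) 2))).length = k := by
      simp [PySem.List.length_pyRange_one]
    simp only [pvStepA]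
    rw [pvStep_init pace hp k]
    refine Prod.ext rfl ?_
    show List.set _ ((k : Int).toNat) _ = _
    rw [Int.toNat_natCast,
      pv_set_mid _ k (n - k) _ _ hlen (by omega)]
    simp only [List.map_cons, List.map_nil, List.append_assoc, List.cons_append, List.nil_append]
    have : n - k - 1 = n - (k + 1) := by omega
    rw [this]

theorem matchcolor_nonpos (car_num : Int) (h : car_num ≤ 0) :
    matchcolor car_num = [] ∧ matchcolor_alt car_num = [] := by
  constructor <;>
    simp [matchcolor, matchcolor_alt, PySem.List.pyRange_one_eq_nil h,
      Int.toNat_of_nonpos h]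

-- ===== VERDICT (by name: the statement is the Claim_ definition above) =====
theorem matchcolor_spec : Claim_equal_matchcolor := by
  intro car_num _ hpre
  unfold Spec_matchcolor
  by_cases h : car_num ≤ 0
  · have := matchcolor_nonpos car_num h
    rw [this.1, this.2]
  · push_neg at h
    obtain ⟨n, hn⟩ : ∃ n : Nat, car_num = (n : Int) :=
      ⟨car_num.toNat, (Int.toNat_of_nonneg h.le).symm⟩
    subst hn
    set spnum := PySem.Int.floordiv (n : Int) 3 + 1 with hsp
    have hsp1 : 0 < spnum := by
      rw [hsp, PySem.Int.floordiv_eq_ediv_of_pos (show (0:Int) < 3 by norm_num)]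
      omega
    have hpace : 0 ≤ PySem.Int.floordiv 240 spnum := by
      rw [PySem.Int.floordiv_eq_ediv_of_pos hsp1]
      exact Int.ediv_nonneg (by norm_num) hsp1.le
    unfold matchcolor matchcolor_alt
    simp only [← hsp]
    rw [Int.toNat_natCast, pv_loop_inv _ hpace n n le_rfl]
    simp only [Nat.sub_self, List.replicate_zero, List.append_nil]
    apply List.map_congr_left
    intro i _
    simp only [pvC]
    rw [show (i + 1 - 1 - 0 : Int) = i - 0 from by ring,
      show (i + 1 - 1 - 1 : Int) = i - 1 from by ring,
      show (i + 1 - 1 - 2 : Int) = i - 2 from by ring]
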